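-- pv_equiv track=rewrite | github.com/Muhammad-Zoraib-Qadir/Cryptarithmetic-Solver-AI | 21i-2654.py | validate_partial_solution
-- ===== SOURCE A (Python) =====
-- def validate_partial_solution(words, letter_mapping):
--     assigned_digits = set()
--     for letter, digit in letter_mapping.items():
--         if digit == 0 and any(word.startswith(letter) for word in words):
--             return False  # Leading digit constraint violated
--         if digit in assigned_digits:
--             return False  # Duplicate digit assignment
--         assigned_digits.add(digit)
--     return True
-- ===== SOURCE B (Python) =====
-- def validate_partial_solution(words, letter_mapping):
--     # duplicate digits: sort the values and scan adjacent pairs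
--     vals = sorted(letter_mapping.values())
--     if any(a == b for a, b in zip(vals, vals[1:])):
--         return False
--     # leading-zero rule: words outer, precomputed zero-mapped letters
--     zero_letters = [l for l, d in letter_mapping.items() if d == 0]
--     return not any(w.startswith(l) for w in words for l in zero_letters)
-- ===== Notes on version B (the rewrite author's own statement) =====
-- stated objective: alternative
-- what changed: Replaces A's single interleaved loop with a mutable seen-set by sorting the digit values and scanning adjacent pairs for duplicates, then an inverted-nesting pass (words outer, precomputed zero-mapped letters) for the leading-zero rule.
import Mathlib
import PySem

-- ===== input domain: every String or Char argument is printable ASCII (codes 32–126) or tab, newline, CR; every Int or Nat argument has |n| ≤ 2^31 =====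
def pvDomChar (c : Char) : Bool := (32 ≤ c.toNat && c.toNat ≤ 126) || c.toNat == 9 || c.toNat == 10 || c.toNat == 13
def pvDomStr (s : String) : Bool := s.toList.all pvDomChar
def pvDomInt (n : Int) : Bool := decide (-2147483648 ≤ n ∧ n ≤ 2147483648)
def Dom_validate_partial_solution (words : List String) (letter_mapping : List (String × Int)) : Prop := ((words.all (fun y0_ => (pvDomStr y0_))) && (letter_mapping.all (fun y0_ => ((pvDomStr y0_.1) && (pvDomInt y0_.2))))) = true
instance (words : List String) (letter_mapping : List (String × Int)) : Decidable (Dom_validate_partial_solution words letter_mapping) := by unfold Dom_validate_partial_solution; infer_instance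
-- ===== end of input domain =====

-- B replaces A's single interleaved loop with a mutable seen-set by sorting the digit
-- values and scanning adjacent pairs for duplicates, then an inverted-nesting pass
-- (words outer, precomputed zero-mapped letters); objective: alternative algorithm.

-- ===== PORT A =====
-- the loop over letter_mapping.items() with the mutable 'assigned_digits' set
def pvGoA (words : List String) : List (String × Int) → PySem.Set Int → Bool
  | [], _ => true
  | (letter, digit) :: rest, assigned =>
    if digit == 0 && words.any (fun word => PySem.Str.startswith word letter) then false
    else if PySem.Set.contains assigned digit then false
    else pvGoA words rest (PySem.Set.add assigned digit)

def validate_partial_solution (words : List String) (letter_mapping : List (String × Int)) : Bool :=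
  pvGoA words letter_mapping PySem.Set.empty

-- ===== PORT B =====
def validate_partial_solution_alt (words : List String) (letter_mapping : List (String × Int)) : Bool :=
  -- vals = sorted(letter_mapping.values())
  let vals := PySem.List.sorted (letter_mapping.map (fun p => p.2)) (fun x => x) false
  -- any(a == b for a, b in zip(vals, vals[1:]))  (vals[1:] with a nonnegative bound = drop 1)
  if (vals.zip (vals.drop 1)).any (fun p => p.1 == p.2) then false
  else
    -- zero_letters = [l for l, d in letter_mapping.items() if d == 0]
    let zero_letters := (letter_mapping.filter (fun p => p.2 == 0)).map (fun p => p.1)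
    -- not any(w.startswith(l) for w in words for l in zero_letters)
    !(words.any (fun w => zero_letters.any (fun l => PySem.Str.startswith w l)))

-- ===== PRECONDITION & SPEC =====
def Spec_validate_partial_solution (words : List String) (letter_mapping : List (String × Int)) (out : Bool) : Prop := out = validate_partial_solution_alt words letter_mapping
instance (words : List String) (letter_mapping : List (String × Int)) (out : Bool) : Decidable (Spec_validate_partial_solution words letter_mapping out) := by unfold Spec_validate_partial_solution; infer_instance

-- ===== CLAIM (what is proved, stated in full; the proofs are below) =====
def Claim_equal_validate_partial_solution : Prop := ∀ (words : List String) (letter_mapping : List (String × Int)), Dom_validate_partial_solution words letter_mapping → Spec_validate_partial_solution words letter_mapping (validate_partial_solution words letter_mapping)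

-- ===== LEMMAS AND PROOFS =====

-- the common meaning: digit values pairwise distinct, no zero-mapped letter prefixes a word
def pvOk (words : List String) (lm : List (String × Int)) : Prop :=
  (lm.map (fun p => p.2)).Nodup ∧
  ∀ p ∈ lm, p.2 = 0 → ∀ w ∈ words, PySem.Str.startswith w p.1 = false

-- A's loop: true iff remaining values distinct, disjoint from the accumulator, no zero violation
theorem pvGoA_true_iff (words : List String) (lm : List (String × Int)) (s : PySem.Set Int) :
    pvGoA words lm s = true ↔
      ((lm.map (fun p => p.2)).Nodup ∧ (∀ p ∈ lm, ¬ p.2 ∈ s) ∧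
       ∀ p ∈ lm, p.2 = 0 → ∀ w ∈ words, PySem.Str.startswith w p.1 = false) := by
  induction lm generalizing s with
  | nil => simp [pvGoA]
  | cons hd tl ih =>
    obtain ⟨letter, digit⟩ := hd
    simp only [pvGoA]
    by_cases hz : (digit == 0 && words.any (fun word => PySem.Str.startswith word letter)) = true
    · rw [if_pos hz]
      simp only [Bool.and_eq_true, beq_iff_eq, List.any_eq_true] at hz
      obtain ⟨hd0, w, hw, hsw⟩ := hz
      constructor
      · intro h; cases h
      · rintro ⟨-, -, hno⟩
        have := hno (letter, digit) List.mem_cons_self hd0 w hw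
        rw [hsw] at this; cases this
    · rw [if_neg hz]
      by_cases hc : PySem.Set.contains s digit = true
      · rw [if_pos hc]
        have hmem := (PySem.Set.contains_iff s digit).mp hc
        constructor
        · intro h; cases h
        · rintro ⟨-, hdisj, -⟩
          exact absurd hmem (hdisj (letter, digit) List.mem_cons_self)
      · rw [if_neg hc, ih]
        have hns : digit ∉ s := fun h => hc ((PySem.Set.contains_iff s digit).mpr h)
        have hzero : digit = 0 → ∀ w ∈ words, PySem.Str.startswith w letter = false := by
          intro h0 w hw
          by_contra hsw
          exact hz (by
            simp only [Bool.and_eq_true, beq_iff_eq, List.any_eq_true]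
            exact ⟨h0, w, hw, by revert hsw; cases PySem.Str.startswith w letter <;> simp⟩)
        simp only [List.mem_cons]
        constructor
        · rintro ⟨hnd, hdisj, hno⟩
          refine ⟨?_, ?_, ?_⟩
          · simp only [List.map_cons, List.nodup_cons]
            refine ⟨?_, hnd⟩
            simp only [List.mem_map]
            rintro ⟨p, hp, hpd⟩
            exact (hdisj p hp) ((PySem.Set.mem_add _ _ _).mpr (Or.inr hpd))
          · rintro p (rfl | hp)
            · exact hns
            · intro hps
              exact (hdisj p hp) ((PySem.Set.mem_add _ _ _).mpr (Or.inl hps))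
          · rintro p (rfl | hp)
            · exact hzero
            · exact hno p hp
        · rintro ⟨hnd, hdisj, hno⟩
          simp only [List.map_cons, List.nodup_cons, List.mem_map] at hnd
          refine ⟨hnd.2, ?_, fun p hp => hno p (Or.inr hp)⟩
          intro p hp hmem
          rcases (PySem.Set.mem_add _ _ _).mp hmem with h | h
          · exact hdisj p (Or.inr hp) h
          · exact hnd.1 ⟨p, hp, h⟩

theorem pvA_true_iff (words : List String) (lm : List (String × Int)) :
    validate_partial_solution words lm = true ↔ pvOk words lm := by
  unfold validate_partial_solution pvOk
  rw [pvGoA_true_iff]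
  have : ∀ p ∈ lm, ¬ p.2 ∈ (PySem.Set.empty : PySem.Set Int) := by
    intro p _ h; cases h
  tauto

-- on a ≤-sorted list, no equal adjacent pair iff no duplicates at all
theorem pvAdj_nodup : ∀ (l : List Int), l.Pairwise (· ≤ ·) →
    (((l.zip (l.drop 1)).any (fun p => p.1 == p.2)) = false ↔ l.Nodup)
  | [], _ => by simp
  | [a], _ => by simp
  | a :: b :: t, hp => by
    have hab : a ≤ b := (List.pairwise_cons.mp hp).1 b List.mem_cons_self
    have hat : ∀ x ∈ t, a ≤ x := fun x hx =>
      (List.pairwise_cons.mp hp).1 x (List.mem_cons_of_mem _ hx)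
    have hbt : ∀ x ∈ t, b ≤ x := fun x hx =>
      (List.pairwise_cons.mp (List.pairwise_cons.mp hp).2).1 x hx
    have ih := pvAdj_nodup (b :: t) (List.pairwise_cons.mp hp).2
    simp only [List.drop_succ_cons, List.drop_zero, List.zip_cons_cons, List.any_cons,
      Bool.or_eq_false_iff, beq_eq_false_iff_ne, ne_eq] at *
    rw [ih, List.nodup_cons (a := a), List.mem_cons]
    constructor
    · rintro ⟨hne, hnd⟩
      refine ⟨?_, hnd⟩
      rintro (rfl | hmem)
      · exact hne rfl
      · have hlt : a < b := lt_of_le_of_ne hab hne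
        exact absurd (hbt a hmem) (not_le.mpr hlt)
    · rintro ⟨hnm, hnd⟩
      exact ⟨fun h => hnm (Or.inl h), hnd⟩

theorem pvB_true_iff (words : List String) (lm : List (String × Int)) :
    validate_partial_solution_alt words lm = true ↔ pvOk words lm := by
  unfold pvOk
  dsimp only [validate_partial_solution_alt]
  have hperm := PySem.List.sorted_perm (lm.map (fun p => p.2)) (fun x => x) false
  have hpw := PySem.List.sorted_pairwise (xs := lm.map (fun p => p.2)) (key := fun x => x)
  set vals := PySem.List.sorted (lm.map (fun p => p.2)) (fun x => x) false with hv
  by_cases hadj : ((vals.zip (vals.drop 1)).any (fun p => p.1 == p.2)) = true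
  · rw [if_pos hadj]
    have hnotnd : ¬ vals.Nodup := by
      intro hnd
      rw [(pvAdj_nodup vals hpw).mpr hnd] at hadj
      cases hadj
    constructor
    · intro h; cases h
    · rintro ⟨hnd, -⟩
      exact absurd (hperm.nodup_iff.mpr hnd) hnotnd
  · rw [if_neg hadj]
    have hadj' : ((vals.zip (vals.drop 1)).any (fun p => p.1 == p.2)) = false := by
      revert hadj; cases ((vals.zip (vals.drop 1)).any (fun p => p.1 == p.2)) <;> simp
    have hnd : (lm.map (fun p => p.2)).Nodup :=
      hperm.nodup_iff.mp ((pvAdj_nodup vals hpw).mp hadj')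
    simp only [Bool.not_eq_eq_eq_not, Bool.not_true, List.any_eq_false]
    constructor
    · intro h
      refine ⟨hnd, ?_⟩
      intro p hp h0 w hw
      have hfa : ((List.map (fun p => p.1) (List.filter (fun p => p.2 == 0) lm)).any
          fun l => PySem.Str.startswith w l) = false := Bool.eq_false_iff.mpr (h w hw)
      have h2 := List.any_eq_false.mp hfa p.1
        (List.mem_map.mpr ⟨p, List.mem_filter.mpr ⟨hp, by simp [h0]⟩, rfl⟩)
      revert h2; cases PySem.Str.startswith w p.1 <;> simp
    · rintro ⟨-, hno⟩
      intro w hw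
      simp only [Bool.not_eq_true]
      rw [List.any_eq_false]
      intro l hl
      obtain ⟨p, hpf, rfl⟩ := List.mem_map.mp hl
      obtain ⟨hp, h0⟩ := List.mem_filter.mp hpf
      rw [hno p hp (by simpa using h0) w hw]
      simp

-- ===== VERDICT (by name: the statement is the Claim_ definition above) =====
theorem validate_partial_solution_spec : Claim_equal_validate_partial_solution := by
  intro words lm _
  unfold Spec_validate_partial_solution
  rw [Bool.eq_iff_iff, pvA_true_iff, pvB_true_iff]
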